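-- pv_equiv track=rewrite | github.com/schneiderkamplab/mlgroom | mlgroom/slurm.py | split_chunk_on_failures
-- ===== SOURCE A (Python) =====
-- def split_chunk_on_failures(start, end, failed_set):
--     remaining = [i for i in range(start, end + 1) if i not in failed_set]
--     if not remaining:
--         return []
--     result = []
--     run_start = remaining[0]
--     prev = remaining[0]
--     for i in remaining[1:]:
--         if i == prev + 1:
--             prev = i
--         else:
--             result.append((run_start, prev))
--             run_start = i
--             prev = i
--     result.append((run_start, prev))
--     return [f"{s}-{e}" if s != e else str(s) for s, e in result]
-- ===== SOURCE B (Python) =====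
-- def split_chunk_on_failures(start, end, failed_set):
--     # Walk the sorted failures inside [start, end]; emit the gap before each
--     # failure and the tail gap, instead of scanning every integer in the range.
--     fs = sorted({x for x in failed_set if start <= x <= end})
--     runs = []
--     lo = start
--     for f in fs:
--         if lo < f:
--             runs.append((lo, f - 1))
--         lo = f + 1
--     if lo <= end:
--         runs.append((lo, end))
--     return [f"{s}-{e}" if s != e else str(s) for s, e in runs]
-- ===== Notes on version B (the rewrite author's own statement) =====
-- stated objective: alternative
-- what changed: Instead of scanning every integer in [start, end] and grouping consecutive survivors into runs, B sorts the (deduplicated) failures inside the range and emits the gaps before each failure and after the last one.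
import Mathlib
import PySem

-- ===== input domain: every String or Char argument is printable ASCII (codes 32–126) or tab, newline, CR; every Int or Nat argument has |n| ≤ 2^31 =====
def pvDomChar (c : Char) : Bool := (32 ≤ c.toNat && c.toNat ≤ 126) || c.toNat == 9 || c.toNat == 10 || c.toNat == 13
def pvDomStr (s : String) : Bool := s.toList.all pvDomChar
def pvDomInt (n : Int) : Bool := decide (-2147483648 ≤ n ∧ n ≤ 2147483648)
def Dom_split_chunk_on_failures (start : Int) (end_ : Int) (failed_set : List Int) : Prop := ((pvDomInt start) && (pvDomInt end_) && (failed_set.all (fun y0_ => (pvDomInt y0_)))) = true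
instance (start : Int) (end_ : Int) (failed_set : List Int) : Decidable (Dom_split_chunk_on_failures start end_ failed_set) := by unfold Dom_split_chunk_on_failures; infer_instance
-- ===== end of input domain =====

-- B replaces A's scan of every integer in [start, end_] by a walk over the sorted failures
-- inside the range, emitting the gaps between them (objective: alternative algorithm).


-- ===== PORT A =====
def split_chunk_on_failures (start : Int) (end_ : Int) (failed_set : List Int) : List String :=
  let remaining := (PySem.List.pyRange start (end_ + 1)).filter (fun i => !(failed_set.contains i))
  match remaining with
  | [] => []
  | r0 :: rest =>
    let st := rest.foldl
      (fun (s : List (Int × Int) × Int × Int) i =>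
        if i = s.2.2 + 1 then (s.1, s.2.1, i)
        else (s.1 ++ [(s.2.1, s.2.2)], i, i))
      ([], r0, r0)
    (st.1 ++ [(st.2.1, st.2.2)]).map (fun se =>
      if se.1 ≠ se.2 then PySem.Int.toStr se.1 ++ "-" ++ PySem.Int.toStr se.2
      else PySem.Int.toStr se.1)

-- ===== PORT B =====
def split_chunk_on_failures_alt (start : Int) (end_ : Int) (failed_set : List Int) : List String :=
  let fs := PySem.List.sorted
    (PySem.Set.ofList (failed_set.filter (fun x => decide (start ≤ x ∧ x ≤ end_))))
    (fun x => x)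
  let st := fs.foldl
    (fun (s : List (Int × Int) × Int) f =>
      (if s.2 < f then s.1 ++ [(s.2, f - 1)] else s.1, f + 1))
    ([], start)
  let runs := if st.2 ≤ end_ then st.1 ++ [(st.2, end_)] else st.1
  runs.map (fun se =>
    if se.1 ≠ se.2 then PySem.Int.toStr se.1 ++ "-" ++ PySem.Int.toStr se.2
    else PySem.Int.toStr se.1)

-- ===== PRECONDITION & SPEC =====
def Spec_split_chunk_on_failures (start : Int) (end_ : Int) (failed_set : List Int) (out : List String) : Prop := out = split_chunk_on_failures_alt start end_ failed_set
instance (start : Int) (end_ : Int) (failed_set : List Int) (out : List String) : Decidable (Spec_split_chunk_on_failures start end_ failed_set out) := by unfold Spec_split_chunk_on_failures; infer_instance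

-- ===== CLAIM (what is proved, stated in full; the proofs are below) =====
def Claim_equal_split_chunk_on_failures : Prop := ∀ (start : Int) (end_ : Int) (failed_set : List Int), Dom_split_chunk_on_failures start end_ failed_set → Spec_split_chunk_on_failures start end_ failed_set (split_chunk_on_failures start end_ failed_set)

-- ===== LEMMAS AND PROOFS =====

-- Close the open run (rs, prev) against an interval list starting at prev+1 or later.
def pvGlue (rs prev : Int) : List (Int × Int) → List (Int × Int)
  | [] => [(rs, prev)]
  | (s, e) :: t => if s = prev + 1 then (rs, e) :: t else (rs, prev) :: (s, e) :: t

-- Reference: the maximal runs of non-failed integers in [c, end_], as (start, end) pairs.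
def pvIvs (failed : List Int) (end_ : Int) (c : Int) : List (Int × Int) :=
  if end_ < c then []
  else if c ∈ failed then pvIvs failed end_ (c + 1)
  else pvGlue c c (pvIvs failed end_ (c + 1))
termination_by (end_ + 1 - c).toNat
decreasing_by all_goals omega

-- A's loop, as structural recursion on the remaining list.
def pvRunsFrom (rs prev : Int) : List Int → List (Int × Int)
  | [] => [(rs, prev)]
  | i :: l => if i = prev + 1 then pvRunsFrom rs i l else (rs, prev) :: pvRunsFrom i i l

-- B's loop, as structural recursion on the failure list.
def pvGaps (end_ : Int) (lo : Int) : List Int → List (Int × Int)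
  | [] => if lo ≤ end_ then [(lo, end_)] else []
  | f :: fs => (if lo < f then [(lo, f - 1)] else []) ++ pvGaps end_ (f + 1) fs

theorem pvFoldA (l : List Int) (res : List (Int × Int)) (rs prev : Int) :
    (l.foldl
      (fun (s : List (Int × Int) × Int × Int) i =>
        if i = s.2.2 + 1 then (s.1, s.2.1, i)
        else (s.1 ++ [(s.2.1, s.2.2)], i, i)) (res, rs, prev)).1 ++
      [((l.foldl
      (fun (s : List (Int × Int) × Int × Int) i =>
        if i = s.2.2 + 1 then (s.1, s.2.1, i)
        else (s.1 ++ [(s.2.1, s.2.2)], i, i)) (res, rs, prev)).2.1,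
        (l.foldl
      (fun (s : List (Int × Int) × Int × Int) i =>
        if i = s.2.2 + 1 then (s.1, s.2.1, i)
        else (s.1 ++ [(s.2.1, s.2.2)], i, i)) (res, rs, prev)).2.2)]
      = res ++ pvRunsFrom rs prev l := by
  induction l generalizing res rs prev with
  | nil => simp [pvRunsFrom]
  | cons i l ih =>
    simp only [List.foldl_cons]
    by_cases hi : i = prev + 1
    · simp only [if_pos hi]
      rw [ih]
      simp [pvRunsFrom, hi]
    · simp only [if_neg hi]
      rw [ih]
      simp [pvRunsFrom, hi]

theorem pvFoldB (end_ : Int) (fs : List Int) (res : List (Int × Int)) (lo : Int) :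
    (if (fs.foldl
      (fun (s : List (Int × Int) × Int) f =>
        (if s.2 < f then s.1 ++ [(s.2, f - 1)] else s.1, f + 1)) (res, lo)).2 ≤ end_
     then (fs.foldl
      (fun (s : List (Int × Int) × Int) f =>
        (if s.2 < f then s.1 ++ [(s.2, f - 1)] else s.1, f + 1)) (res, lo)).1 ++
        [((fs.foldl
      (fun (s : List (Int × Int) × Int) f =>
        (if s.2 < f then s.1 ++ [(s.2, f - 1)] else s.1, f + 1)) (res, lo)).2, end_)]
     else (fs.foldl
      (fun (s : List (Int × Int) × Int) f =>
        (if s.2 < f then s.1 ++ [(s.2, f - 1)] else s.1, f + 1)) (res, lo)).1)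
      = res ++ pvGaps end_ lo fs := by
  induction fs generalizing res lo with
  | nil =>
    simp only [List.foldl_nil, pvGaps]
    split <;> simp
  | cons f fs ih =>
    simp only [List.foldl_cons]
    by_cases hf : lo < f
    · simp only [if_pos hf]
      rw [ih]
      simp [pvGaps, hf]
    · simp only [if_neg hf]
      rw [ih]
      simp [pvGaps, hf]

theorem pvGlueMerge (rs prev : Int) (L : List (Int × Int)) :
    pvGlue rs prev (pvGlue (prev + 1) (prev + 1) L) = pvGlue rs (prev + 1) L := by
  cases L with
  | nil => simp [pvGlue]
  | cons h t =>
    obtain ⟨s, e⟩ := h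
    by_cases hs : s = prev + 1 + 1 <;> simp [pvGlue, hs]

theorem pvIvsHead (failed : List Int) (end_ : Int) (c s e : Int) (t : List (Int × Int))
    (h : pvIvs failed end_ c = (s, e) :: t) : c ≤ s := by
  rw [pvIvs] at h
  split at h
  · exact absurd h (by simp)
  · split at h
    · have := pvIvsHead failed end_ (c + 1) s e t h
      omega
    · cases hL : pvIvs failed end_ (c + 1) with
      | nil =>
        rw [hL] at h
        simp [pvGlue] at h
        omega
      | cons p t' =>
        obtain ⟨s', e'⟩ := p
        rw [hL] at h
        by_cases hs : s' = c + 1 <;> simp [pvGlue, hs] at h <;> omega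
termination_by (end_ + 1 - c).toNat
decreasing_by all_goals omega

theorem pvGlueNeNil (rs prev : Int) (L : List (Int × Int)) : pvGlue rs prev L ≠ [] := by
  cases L with
  | nil => simp [pvGlue]
  | cons p t =>
    obtain ⟨s, e⟩ := p
    by_cases hs : s = prev + 1 <;> simp [pvGlue, hs]

theorem pvGlueHead (rs prev : Int) (L : List (Int × Int)) (s e : Int) (t : List (Int × Int))
    (h : pvGlue rs prev L = (s, e) :: t) : s = rs := by
  cases L with
  | nil =>
    simp only [pvGlue, List.cons.injEq, Prod.mk.injEq] at h
    omega
  | cons p t' =>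
    obtain ⟨s', e'⟩ := p
    by_cases hs : s' = prev + 1 <;> simp [pvGlue, hs] at h <;> omega

theorem pvRangeNil (c b : Int) (h : b ≤ c) : PySem.List.pyRange c b = [] := by
  rw [List.eq_nil_iff_forall_not_mem]
  intro x hx
  rw [PySem.List.mem_pyRange_one] at hx
  omega

-- A's run-building over the remaining integers of [c, end_] computes pvIvs, glued to the open run.
theorem pvL2 (failed : List Int) (end_ : Int) (c rs prev : Int) (h : prev + 1 ≤ c) :
    pvRunsFrom rs prev ((PySem.List.pyRange c (end_ + 1)).filter (fun i => !(failed.contains i))) =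
    pvGlue rs prev (pvIvs failed end_ c) := by
  by_cases hc : end_ < c
  · rw [pvRangeNil c (end_ + 1) (by omega), pvIvs]
    simp [hc, pvRunsFrom, pvGlue]
  · rw [PySem.List.pyRange_one_cons (by omega), pvIvs, if_neg hc]
    by_cases hf : c ∈ failed
    · rw [List.filter_cons_of_neg (by simp [hf]), if_pos hf]
      exact pvL2 failed end_ (c + 1) rs prev (by omega)
    · rw [List.filter_cons_of_pos (by simp [hf]), if_neg hf]
      by_cases hcp : c = prev + 1
      · rw [pvRunsFrom, if_pos hcp, pvL2 failed end_ (c + 1) rs c (by omega)]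
        subst hcp
        exact (pvGlueMerge rs prev _).symm
      · rw [pvRunsFrom, if_neg hcp, pvL2 failed end_ (c + 1) c c (by omega)]
        cases hG : pvGlue c c (pvIvs failed end_ (c + 1)) with
        | nil => exact absurd hG (pvGlueNeNil c c _)
        | cons p t =>
          obtain ⟨s, e⟩ := p
          have hsc : s = c := pvGlueHead c c _ s e t hG
          subst hsc
          simp [pvGlue, hcp]
termination_by (end_ + 1 - c).toNat
decreasing_by all_goals omega

theorem pvL4 (failed : List Int) (end_ : Int) (c : Int) :
    (match (PySem.List.pyRange c (end_ + 1)).filter (fun i => !(failed.contains i)) with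
      | [] => ([] : List (Int × Int))
      | i :: l => pvRunsFrom i i l) = pvIvs failed end_ c := by
  by_cases hc : end_ < c
  · rw [pvRangeNil c (end_ + 1) (by omega), pvIvs]
    simp [hc]
  · rw [PySem.List.pyRange_one_cons (by omega), pvIvs, if_neg hc]
    by_cases hf : c ∈ failed
    · rw [List.filter_cons_of_neg (by simp [hf]), if_pos hf]
      exact pvL4 failed end_ (c + 1)
    · rw [List.filter_cons_of_pos (by simp [hf]), if_neg hf]
      exact pvL2 failed end_ (c + 1) c c (by omega)
termination_by (end_ + 1 - c).toNat
decreasing_by all_goals omega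

theorem pvIvsNoFail (failed : List Int) (end_ : Int) (lo : Int)
    (h : ∀ x, lo ≤ x → x ≤ end_ → x ∉ failed) :
    pvIvs failed end_ lo = if lo ≤ end_ then [(lo, end_)] else [] := by
  rw [pvIvs]
  by_cases hc : end_ < lo
  · simp [hc, if_neg (by omega : ¬ lo ≤ end_)]
  · rw [if_neg hc, if_neg (h lo le_rfl (by omega)),
      pvIvsNoFail failed end_ (lo + 1) (fun x hx1 hx2 => h x (by omega) hx2)]
    by_cases h2 : lo + 1 ≤ end_
    · simp [pvGlue, h2, if_pos (by omega : lo ≤ end_)]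
    · have hle : lo = end_ := by omega
      simp [pvGlue, hle]
termination_by (end_ + 1 - lo).toNat
decreasing_by all_goals omega

theorem pvL5 (failed : List Int) (end_ : Int) (lo f : Int)
    (h1 : lo ≤ f) (h2 : f ≤ end_) (h3 : f ∈ failed)
    (h4 : ∀ x, lo ≤ x → x < f → x ∉ failed) :
    pvIvs failed end_ lo =
      (if lo < f then [(lo, f - 1)] else []) ++ pvIvs failed end_ (f + 1) := by
  by_cases hlf : lo = f
  · subst hlf
    rw [pvIvs, if_neg (by omega), if_pos h3]
    simp
  · have hlo : lo < f := by omega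
    rw [pvIvs, if_neg (by omega), if_neg (h4 lo le_rfl hlo),
      pvL5 failed end_ (lo + 1) f (by omega) h2 h3 (fun x hx1 hx2 => h4 x (by omega) hx2)]
    by_cases h5 : lo + 1 < f
    · simp only [if_pos h5, if_pos hlo, List.cons_append, List.nil_append]
      simp [pvGlue]
    · have hf : f = lo + 1 := by omega
      simp only [if_neg h5, List.nil_append, if_pos hlo]
      cases hL : pvIvs failed end_ (f + 1) with
      | nil => simp [pvGlue, hf]
      | cons p t =>
        obtain ⟨s, e⟩ := p
        have hs : f + 1 ≤ s := pvIvsHead failed end_ (f + 1) s e t hL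
        simp [pvGlue, hf, show ¬ s = lo + 1 by omega]
termination_by (f - lo).toNat
decreasing_by all_goals omega

theorem pvL6 (failed : List Int) (end_ : Int) (fs : List Int) (lo : Int)
    (hs : fs.Pairwise (· < ·))
    (hm : ∀ x, x ∈ fs ↔ x ∈ failed ∧ lo ≤ x ∧ x ≤ end_) :
    pvGaps end_ lo fs = pvIvs failed end_ lo := by
  induction fs generalizing lo with
  | nil =>
    rw [pvGaps, pvIvsNoFail failed end_ lo (by
      intro x hx1 hx2 hxf
      exact absurd ((hm x).mpr ⟨hxf, hx1, hx2⟩) (List.not_mem_nil))]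
  | cons f fs ih =>
    have hf := (hm f).mp List.mem_cons_self
    have hlt : ∀ y ∈ fs, f < y := (List.pairwise_cons.mp hs).1
    rw [pvGaps, pvL5 failed end_ lo f hf.2.1 hf.2.2 hf.1 (by
        intro x hx1 hx2 hxf
        rcases List.mem_cons.mp ((hm x).mpr ⟨hxf, hx1, by omega⟩) with h | h
        · omega
        · exact absurd (hlt x h) (by omega)),
      ih (f + 1) (List.pairwise_cons.mp hs).2 (by
        intro x
        constructor
        · intro hx
          have hx1 := (hm x).mp (List.mem_cons_of_mem f hx)
          have hx2 := hlt x hx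
          exact ⟨hx1.1, by omega, hx1.2.2⟩
        · rintro ⟨hxf, hx1, hx2⟩
          rcases List.mem_cons.mp ((hm x).mpr ⟨hxf, by omega, hx2⟩) with h | h
          · omega
          · exact h)]

-- ===== VERDICT (by name: the statement is the Claim_ definition above) =====
theorem split_chunk_on_failures_spec : Claim_equal_split_chunk_on_failures := by
  intro start end_ failed_set _
  unfold Spec_split_chunk_on_failures
  have hA : split_chunk_on_failures start end_ failed_set =
      (pvIvs failed_set end_ start).map (fun se =>
        if se.1 ≠ se.2 then PySem.Int.toStr se.1 ++ "-" ++ PySem.Int.toStr se.2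
        else PySem.Int.toStr se.1) := by
    simp only [split_chunk_on_failures]
    rw [← pvL4 failed_set end_ start]
    rcases hrem : (PySem.List.pyRange start (end_ + 1)).filter (fun i => !(failed_set.contains i))
      with _ | ⟨r0, rest⟩
    · simp
    · simp only []
      rw [pvFoldA rest [] r0 r0]
      simp
  have hB : split_chunk_on_failures_alt start end_ failed_set =
      (pvIvs failed_set end_ start).map (fun se =>
        if se.1 ≠ se.2 then PySem.Int.toStr se.1 ++ "-" ++ PySem.Int.toStr se.2
        else PySem.Int.toStr se.1) := by
    simp only [split_chunk_on_failures_alt]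
    rw [pvFoldB end_ _ [] start,
      pvL6 failed_set end_ _ start (PySem.List.sorted_ofList_pairwise_lt _) (by
        intro x
        rw [PySem.List.mem_sorted, PySem.Set.mem_ofList, List.mem_filter]
        simp)]
    simp
  rw [hA, hB]
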